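-- pv_equiv track=rewrite | github.com/dehbi16/TP1-Cr-ation-d-un-agent-aspirateur | N-Queens Breadth first search.py | positions
-- ===== SOURCE A (Python) =====
-- n = 4
--
-- def positions(L):
--     positionpossible = []
--     for i in range(n):
--         possible = True
--         if i not in L:
--             for j in range(len(L)):
--                 if abs(L[j]-i) == abs(len(L)-j):
--                     possible = False
--         else:
--             possible = False
--         if possible:
--             positionpossible.append(i)
--     return positionpossible
-- ===== SOURCE B (Python) =====
-- n = 4
--
-- def positions(L):
--     # Build the forbidden-column list once from the placed queens, then one forward pass.
--     k = len(L)
--     forbidden = list(L)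
--     for j, c in enumerate(L):
--         d = k - j
--         forbidden.append(c + d)
--         forbidden.append(c - d)
--     return [i for i in range(n) if i not in forbidden]
-- ===== Notes on version B (the rewrite author's own statement) =====
-- stated objective: simpler
-- what changed: Inverts the loop nesting: instead of testing every candidate column against every placed queen, B loops once over the queens to collect all occupied/attacked columns into a forbidden list, then filters range(n) in one pass.
import Mathlib
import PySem

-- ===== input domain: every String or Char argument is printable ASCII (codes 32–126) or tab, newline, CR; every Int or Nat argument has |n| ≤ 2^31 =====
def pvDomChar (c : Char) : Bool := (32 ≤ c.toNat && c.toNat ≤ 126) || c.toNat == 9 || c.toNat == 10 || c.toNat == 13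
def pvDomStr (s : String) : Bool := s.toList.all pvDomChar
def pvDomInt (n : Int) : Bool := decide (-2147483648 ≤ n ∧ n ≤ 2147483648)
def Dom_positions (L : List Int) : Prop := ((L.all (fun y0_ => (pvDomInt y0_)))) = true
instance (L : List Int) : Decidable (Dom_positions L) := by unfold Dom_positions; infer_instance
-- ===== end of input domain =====

-- B inverts the loop nesting (collect forbidden columns from the queens once, then filter range(n)); same values, simpler single queen pass.

-- ===== PORT A =====
def positions (L : List Int) : List Int :=
  (PySem.List.pyRange 0 4 1).foldl (fun acc i =>
    let possible :=
      if !(L.contains i) then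
        -- inner loop: for j in range(len(L)); L[j] never raises here, ported as pyGetD
        (PySem.List.pyRange 0 (L.length : Int) 1).foldl
          (fun p j =>
            if (PySem.List.pyGetD L j 0 - i).natAbs = ((L.length : Int) - j).natAbs then false else p)
          true
      else false
    if possible then acc ++ [i] else acc) []

-- ===== PORT B =====
def positions_alt (L : List Int) : List Int :=
  let k : Int := L.length
  let forbidden :=
    (PySem.List.enumerate L 0).foldl
      (fun f jc => f ++ [jc.2 + (k - jc.1), jc.2 - (k - jc.1)]) L
  (PySem.List.pyRange 0 4 1).filter (fun i => !(forbidden.contains i))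

-- ===== PRECONDITION & SPEC =====
def Spec_positions (L : List Int) (out : List Int) : Prop := out = positions_alt L
instance (L : List Int) (out : List Int) : Decidable (Spec_positions L out) := by unfold Spec_positions; infer_instance

-- ===== CLAIM (what is proved, stated in full; the proofs are below) =====
def Claim_equal_positions : Prop := ∀ (L : List Int), Dom_positions L → Spec_positions L (positions L)

-- ===== LEMMAS AND PROOFS =====

-- A's inner loop: folding 'if hit then false else p' computes 'start && no element hits'
lemma foldl_false_if (c : Int → Prop) [DecidablePred c] (js : List Int) (b : Bool) :
    js.foldl (fun p j => if c j then false else p) b = (b && js.all (fun j => decide ¬ c j)) := by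
  induction js generalizing b with
  | nil => simp
  | cons j js ih =>
    rw [List.foldl_cons, ih]
    by_cases h : c j <;> simp [h]

-- pointwise agreement of the two candidate tests
lemma pred_agree (L : List Int) (i : Int) :
    (if !(L.contains i) then
        (PySem.List.pyRange 0 (L.length : Int) 1).foldl
          (fun p j =>
            if (PySem.List.pyGetD L j 0 - i).natAbs = ((L.length : Int) - j).natAbs then false else p)
          true
      else false)
    = !((PySem.List.enumerate L 0).foldl
          (fun f jc => f ++ [jc.2 + ((L.length : Int) - jc.1), jc.2 - ((L.length : Int) - jc.1)]) L).contains i := by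
  rw [PySem.List.foldl_append_eq_flatMap]
  rw [foldl_false_if]
  rw [Bool.eq_iff_iff]
  simp only [Bool.if_false_right, Bool.and_eq_true, Bool.not_eq_eq_eq_not, Bool.not_true,
    List.contains_eq_mem, List.all_eq_true, Bool.not_eq_true', decide_eq_false_iff_not,
    List.mem_append, List.mem_flatMap, PySem.List.mem_enumerate_iff, PySem.List.mem_pyRange_one,
    decide_eq_true_eq, Bool.not_eq_true]
  constructor
  · rintro ⟨hni, -, hall⟩
    push_neg
    refine ⟨by simpa using hni, ?_⟩
    rintro p ⟨k, hk, rfl⟩ hmem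
    have h := hall (k : Int) ⟨by positivity, by exact_mod_cast hk⟩
    rw [PySem.List.pyGetD_natCast] at h
    simp only [List.getD_eq_getElem?_getD, List.getElem?_eq_getElem hk, Option.getD_some] at h
    simp only [zero_add, List.mem_cons, List.mem_singleton, List.not_mem_nil] at hmem
    rcases hmem with h1 | h1 | h1
    · exact h (by omega)
    · exact h (by omega)
    · exact h1.elim
  · intro h
    push_neg at h
    obtain ⟨hni, hforb⟩ := h
    refine ⟨by simpa using hni, trivial, ?_⟩
    rintro j ⟨hj0, hjlen⟩
    have hk : j.toNat < L.length := by omega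
    have hspec := hforb (0 + (j.toNat : Int), L[j.toNat]) ⟨j.toNat, hk, rfl⟩
    simp only [zero_add, List.mem_cons, List.mem_singleton, List.not_mem_nil, or_false] at hspec
    push_neg at hspec
    have hj : j = (j.toNat : Int) := by omega
    rw [hj, PySem.List.pyGetD_natCast]
    simp only [List.getD_eq_getElem?_getD, List.getElem?_eq_getElem hk, Option.getD_some]
    omega

lemma positions_eq (L : List Int) : positions L = positions_alt L := by
  unfold positions positions_alt
  rw [PySem.List.foldl_append_if_eq_filter]
  simp only [List.nil_append]
  exact List.filter_congr (fun i _ => pred_agree L i)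

-- ===== VERDICT (by name: the statement is the Claim_ definition above) =====
theorem positions_spec : Claim_equal_positions := by
  intro L _
  unfold Spec_positions
  exact positions_eq L
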